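-- pv_equiv track=rewrite | github.com/jokar29/habi-prueba | bloques.py | ordenar_bloques
-- ===== SOURCE A (Python) =====
-- def ordenar_bloques(myArray):
--     resultado = []
--     bloque = []
--
--     for num in myArray:
--         if num != 0:
--             bloque.append(num)
--         else:
--             if bloque:
--                 resultado.append(''.join(sorted([str(num) for num in bloque])))
--             else:
--                 resultado.append('X')
--             bloque = []
--
--     # Ultimo bloque si no termina con cero
--     if bloque:
--         resultado.append(''.join(sorted([str(num) for num in bloque])))
--
--     return ' '.join(resultado)
-- ===== SOURCE B (Python) =====
-- def ordenar_bloques(myArray):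
--     # recursive split at the first zero, instead of A's accumulate-and-emit loop
--     if 0 not in myArray:
--         return ''.join(sorted(str(n) for n in myArray))
--     i = myArray.index(0)
--     head = 'X' if i == 0 else ''.join(sorted(str(n) for n in myArray[:i]))
--     tail = myArray[i + 1:]
--     return head if not tail else head + ' ' + ordenar_bloques(tail)
-- ===== Notes on version B (the rewrite author's own statement) =====
-- stated objective: alternative
-- what changed: A's single accumulate-and-emit loop over elements (carrying a pending block and an output list) is replaced by a recursion that finds the first zero, slices off and formats the head block, and recurses on the remainder.
import Mathlib
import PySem

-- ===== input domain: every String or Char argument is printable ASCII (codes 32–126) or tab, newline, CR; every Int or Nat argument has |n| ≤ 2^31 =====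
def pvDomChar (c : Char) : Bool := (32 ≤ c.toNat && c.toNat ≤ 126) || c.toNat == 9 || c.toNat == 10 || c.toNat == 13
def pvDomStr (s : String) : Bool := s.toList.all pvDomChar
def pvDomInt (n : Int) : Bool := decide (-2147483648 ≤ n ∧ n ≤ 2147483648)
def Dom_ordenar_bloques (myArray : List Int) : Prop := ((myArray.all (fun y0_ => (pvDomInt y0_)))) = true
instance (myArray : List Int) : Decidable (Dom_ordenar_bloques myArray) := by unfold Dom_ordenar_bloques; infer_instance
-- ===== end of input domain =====

-- B replaces A's interleaved accumulate-and-emit loop by a recursion that splits the list at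
-- its first zero (format the head block, recurse on the rest); objective: alternative decomposition.

-- ===== PORT A =====
-- ''.join(sorted([str(num) for num in bloque]))
def fmtA (bloque : List Int) : String :=
  PySem.Str.join "" (PySem.List.sorted (bloque.map PySem.Int.toStr) (fun s => s) false)

def ordenar_bloques (myArray : List Int) : String :=
  let st := myArray.foldl
    (fun (p : List String × List Int) num =>
      if num ≠ 0 then (p.1, p.2 ++ [num])
      else (p.1 ++ [if p.2 ≠ [] then fmtA p.2 else "X"], []))
    ([], [])
  let resultado := if st.2 ≠ [] then st.1 ++ [fmtA st.2] else st.1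
  PySem.Str.join " " resultado

-- ===== PORT B =====
-- ''.join(sorted(str(n) for n in seg))
def fmtB (seg : List Int) : String :=
  PySem.Str.join "" (PySem.List.sorted (seg.map PySem.Int.toStr) (fun s => s) false)

def ordenar_bloques_alt (myArray : List Int) : String :=
  match h : PySem.List.index? myArray 0 with
  | none => fmtB myArray
  | some i =>
      let head := if i = 0 then "X" else fmtB (PySem.List.slice myArray none (some (i : Int)))
      let tail := PySem.List.slice myArray (some ((i : Int) + 1)) none
      if tail = [] then head else head ++ " " ++ ordenar_bloques_alt tail
termination_by myArray.length
decreasing_by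
  obtain ⟨hi, -, -⟩ := PySem.List.getElem_of_index?_eq_some h
  have hd : PySem.List.slice myArray (some ((i : Int) + 1)) none = myArray.drop (i + 1) := by
    have hc : ((i : Int) + 1) = ((i + 1 : Nat) : Int) := by push_cast; ring
    rw [hc, PySem.List.slice_from_natCast]
  simp [hd]
  omega

-- ===== PRECONDITION & SPEC =====
def Spec_ordenar_bloques (myArray : List Int) (out : String) : Prop := out = ordenar_bloques_alt myArray
instance (myArray : List Int) (out : String) : Decidable (Spec_ordenar_bloques myArray out) := by unfold Spec_ordenar_bloques; infer_instance

-- ===== CLAIM (what is proved, stated in full; the proofs are below) =====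
def Claim_equal_ordenar_bloques : Prop := ∀ (myArray : List Int), Dom_ordenar_bloques myArray → Spec_ordenar_bloques myArray (ordenar_bloques myArray)

-- ===== LEMMAS AND PROOFS =====

-- the parts A will still emit, given the pending block `blk` and the remaining input `l`
def partsFrom (blk l : List Int) : List String :=
  match l with
  | [] => if blk = [] then [] else [fmtA blk]
  | x :: xs =>
      if x = 0 then (if blk = [] then "X" else fmtA blk) :: partsFrom [] xs
      else partsFrom (blk ++ [x]) xs

theorem loop_inv (l : List Int) : ∀ (res : List String) (blk : List Int),
    (let st := l.foldl
      (fun (p : List String × List Int) num =>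
        if num ≠ 0 then (p.1, p.2 ++ [num])
        else (p.1 ++ [if p.2 ≠ [] then fmtA p.2 else "X"], [])) (res, blk);
     if st.2 ≠ [] then st.1 ++ [fmtA st.2] else st.1) = res ++ partsFrom blk l := by
  induction l with
  | nil =>
      intro res blk
      simp only [List.foldl_nil, partsFrom]
      by_cases h : blk = [] <;> simp [h]
  | cons x xs ih =>
      intro res blk
      simp only [List.foldl_cons, partsFrom]
      by_cases hx : x = 0
      · subst hx
        by_cases hb : blk = []
        · simp only [hb]; simpa using ih (res ++ ["X"]) []
        · simp only [if_neg hb]; simpa [hb] using ih (res ++ [fmtA blk]) []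
      · simpa [hx] using ih res (blk ++ [x])

theorem ordenar_bloques_eq_parts (l : List Int) :
    ordenar_bloques l = PySem.Str.join " " (partsFrom [] l) :=
  congrArg (PySem.Str.join " ") (by simpa using loop_inv l [] [])

theorem partsFrom_no_zero (l : List Int) (hz : (0:Int) ∉ l) : ∀ (blk : List Int),
    partsFrom blk l = if blk ++ l = [] then [] else [fmtA (blk ++ l)] := by
  induction l with
  | nil => intro blk; simp [partsFrom]
  | cons x xs ih =>
      intro blk
      have hx : x ≠ 0 := fun h => hz (h ▸ List.mem_cons_self ..)
      have hz' : (0:Int) ∉ xs := fun h => hz (List.mem_cons_of_mem _ h)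
      simp only [partsFrom, if_neg hx]
      rw [ih hz' (blk ++ [x])]
      simp

theorem partsFrom_split (pre : List Int) : ∀ (suf blk : List Int), (0:Int) ∉ pre →
    partsFrom blk (pre ++ 0 :: suf)
      = (if blk ++ pre = [] then "X" else fmtA (blk ++ pre)) :: partsFrom [] suf := by
  induction pre with
  | nil => intro suf blk _; simp [partsFrom]
  | cons x xs ih =>
      intro suf blk hz
      have hx : x ≠ 0 := fun h => hz (h ▸ List.mem_cons_self ..)
      have hz' : (0:Int) ∉ xs := fun h => hz (List.mem_cons_of_mem _ h)
      simp only [List.cons_append, partsFrom, if_neg hx]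
      rw [ih suf (blk ++ [x]) hz']
      simp

theorem partsFrom_ne_nil (l : List Int) : ∀ (blk : List Int), (blk ≠ [] ∨ l ≠ []) → partsFrom blk l ≠ [] := by
  induction l with
  | nil => intro blk h; simp [partsFrom]; tauto
  | cons x xs ih =>
      intro blk _
      by_cases hx : x = 0
      · subst hx; simp [partsFrom]
      · simp only [partsFrom, if_neg hx]
        exact ih (blk ++ [x]) (Or.inl (by simp))

theorem join_space_cons (h : String) (t : List String) (ht : t ≠ []) :
    PySem.Str.join " " (h :: t) = h ++ " " ++ PySem.Str.join " " t := by
  obtain ⟨b, t', rfl⟩ := List.exists_cons_of_ne_nil ht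
  apply String.ext
  simp [PySem.Str.join, PySem.Chars.join_cons_cons]

theorem alt_eq_parts (l : List Int) :
    ordenar_bloques_alt l = PySem.Str.join " " (partsFrom [] l) := by
  induction l using ordenar_bloques_alt.induct with
  | case1 l h =>
      rw [ordenar_bloques_alt]
      rw [h]
      have hz : (0:Int) ∉ l := by
        rw [← PySem.List.index?_eq_none_iff (xs := l) (v := 0)]; exact h
      rw [partsFrom_no_zero l hz []]
      by_cases hl : l = []
      · subst hl; decide
      · simp only [List.nil_append, if_neg hl]
        apply String.ext
        simp [fmtA, fmtB, PySem.Str.join, PySem.Chars.join_singleton]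
  | case2 l i h tl htl =>
      obtain ⟨pre, suf, hl, hlen, hzpre⟩ := (PySem.List.index?_eq_some_iff (xs := l) (v := 0) (k := i)).mp h
      have hdrop : PySem.List.slice l (some ((i : Int) + 1)) none = suf := by
        have hc : ((i : Int) + 1) = ((i + 1 : Nat) : Int) := by push_cast; ring
        rw [hc, PySem.List.slice_from_natCast, hl, ← hlen]
        have he : pre ++ 0 :: suf = (pre ++ [0]) ++ suf := by simp
        rw [he, List.drop_left' (by simp)]
      have hsuf : suf = [] := by rw [← hdrop]; exact htl
      rw [ordenar_bloques_alt, h]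
      simp only [hdrop, hsuf, reduceIte]
      have htake : PySem.List.slice l none (some (i : Int)) = pre := by
        rw [PySem.List.slice_to_natCast, hl, ← hlen, List.take_left]
      rw [hl, hsuf] at htake
      rw [hl, partsFrom_split pre suf [] hzpre, hsuf]
      simp only [List.nil_append, partsFrom, reduceIte]
      rw [htake]
      by_cases hp : pre = []
      · simp [hp, ← hlen]; decide
      · have hi0 : i ≠ 0 := by rw [← hlen]; simpa using hp
        simp only [if_neg hp, if_neg hi0]
        apply String.ext
        simp [fmtA, fmtB, PySem.Str.join, PySem.Chars.join_singleton]
  | case3 l i h tl htl ih =>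
      obtain ⟨pre, suf, hl, hlen, hzpre⟩ := (PySem.List.index?_eq_some_iff (xs := l) (v := 0) (k := i)).mp h
      have hdrop : PySem.List.slice l (some ((i : Int) + 1)) none = suf := by
        have hc : ((i : Int) + 1) = ((i + 1 : Nat) : Int) := by push_cast; ring
        rw [hc, PySem.List.slice_from_natCast, hl, ← hlen]
        have he : pre ++ 0 :: suf = (pre ++ [0]) ++ suf := by simp
        rw [he, List.drop_left' (by simp)]
      have htl_eq : tl = suf := hdrop
      have hsuf : suf ≠ [] := by rw [← htl_eq]; exact htl
      rw [ordenar_bloques_alt, h]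
      simp only [hdrop, if_neg hsuf]
      have htake : PySem.List.slice l none (some (i : Int)) = pre := by
        rw [PySem.List.slice_to_natCast, hl, ← hlen, List.take_left]
      rw [hl] at htake
      rw [hl, partsFrom_split pre suf [] hzpre]
      simp only [List.nil_append]
      rw [join_space_cons _ _ (partsFrom_ne_nil suf [] (Or.inr hsuf))]
      rw [htl_eq] at ih
      rw [ih, htake]
      by_cases hp : pre = []
      · simp [hp, ← hlen]
      · have hi0 : i ≠ 0 := by rw [← hlen]; simpa using hp
        simp only [if_neg hp, if_neg hi0]
        rfl

-- ===== VERDICT (by name: the statement is the Claim_ definition above) =====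
theorem ordenar_bloques_spec : Claim_equal_ordenar_bloques := by
  intro l _
  unfold Spec_ordenar_bloques
  rw [ordenar_bloques_eq_parts, alt_eq_parts]
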